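-- pv_equiv track=rewrite | github.com/aidenisaman/pyRacerzRevamped | modules/ai_track_model.py | _touching_checkpoint_tiles
-- ===== SOURCE A (Python) =====
-- def _touching_checkpoint_tiles(filled_tiles, checkpoint_tiles):
--   if not filled_tiles or not checkpoint_tiles:
--     return set()
--   edge = set()
--   for tile in checkpoint_tiles:
--     for n in (
--       (tile[0] + 1, tile[1]),
--       (tile[0] - 1, tile[1]),
--       (tile[0], tile[1] + 1),
--       (tile[0], tile[1] - 1),
--     ):
--       if n in filled_tiles:
--         edge.add(tile)
--         break
--   return edge
-- ===== SOURCE B (Python) =====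
-- def _touching_checkpoint_tiles(filled_tiles, checkpoint_tiles):
--     if not filled_tiles or not checkpoint_tiles:
--         return set()
--     reach = set()
--     for (x, y) in filled_tiles:
--         reach.update(((x + 1, y), (x - 1, y), (x, y + 1), (x, y - 1)))
--     return {t for t in checkpoint_tiles if t in reach}
-- ===== Notes on version B (the rewrite author's own statement) =====
-- stated objective: alternative
-- what changed: Instead of probing each checkpoint's four neighbors against the filled list, B dilates the filled tiles once into a neighbor set and then filters the checkpoints by membership in that set.
import Mathlib
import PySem

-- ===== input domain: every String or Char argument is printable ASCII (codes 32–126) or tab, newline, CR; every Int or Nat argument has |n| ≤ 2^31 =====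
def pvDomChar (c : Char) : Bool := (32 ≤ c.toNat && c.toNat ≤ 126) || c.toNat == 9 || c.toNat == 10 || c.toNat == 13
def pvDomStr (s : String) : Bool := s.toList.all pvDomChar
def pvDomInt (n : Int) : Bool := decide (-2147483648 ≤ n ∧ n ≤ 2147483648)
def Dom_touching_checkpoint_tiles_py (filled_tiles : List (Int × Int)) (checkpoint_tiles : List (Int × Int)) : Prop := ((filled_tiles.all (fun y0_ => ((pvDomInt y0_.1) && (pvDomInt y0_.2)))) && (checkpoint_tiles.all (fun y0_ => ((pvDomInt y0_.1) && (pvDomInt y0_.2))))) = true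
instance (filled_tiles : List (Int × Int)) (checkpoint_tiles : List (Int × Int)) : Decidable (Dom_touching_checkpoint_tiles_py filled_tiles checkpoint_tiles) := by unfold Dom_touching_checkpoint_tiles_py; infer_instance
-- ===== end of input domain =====

-- B builds the dilation of the filled tiles once (a set of all their four-neighbours) and then
-- filters the checkpoints by membership in it, instead of probing each checkpoint's neighbourhood
-- against the filled list; return values agree everywhere (alternative decomposition).

-- ===== PORT A =====
def touching_checkpoint_tiles_py (filled_tiles : List (Int × Int)) (checkpoint_tiles : List (Int × Int)) : List (Int × Int) :=
  if filled_tiles = [] ∨ checkpoint_tiles = [] then PySem.Set.empty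
  else
    checkpoint_tiles.foldl (fun edge tile =>
      if (tile.1 + 1, tile.2) ∈ filled_tiles then PySem.Set.add edge tile
      else if (tile.1 - 1, tile.2) ∈ filled_tiles then PySem.Set.add edge tile
      else if (tile.1, tile.2 + 1) ∈ filled_tiles then PySem.Set.add edge tile
      else if (tile.1, tile.2 - 1) ∈ filled_tiles then PySem.Set.add edge tile
      else edge) PySem.Set.empty

-- ===== PORT B =====
def pvNeighbors (t : Int × Int) : List (Int × Int) :=
  [(t.1 + 1, t.2), (t.1 - 1, t.2), (t.1, t.2 + 1), (t.1, t.2 - 1)]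

def touching_checkpoint_tiles_py_alt (filled_tiles : List (Int × Int)) (checkpoint_tiles : List (Int × Int)) : List (Int × Int) :=
  if filled_tiles = [] ∨ checkpoint_tiles = [] then PySem.Set.empty
  else
    let reach := filled_tiles.foldl (fun s t => PySem.Set.update s (pvNeighbors t)) PySem.Set.empty
    checkpoint_tiles.foldl (fun acc t => if t ∈ reach then PySem.Set.add acc t else acc) PySem.Set.empty

-- ===== PRECONDITION & SPEC =====
def Spec_touching_checkpoint_tiles_py (filled_tiles : List (Int × Int)) (checkpoint_tiles : List (Int × Int)) (out : List (Int × Int)) : Prop := out = touching_checkpoint_tiles_py_alt filled_tiles checkpoint_tiles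
instance (filled_tiles : List (Int × Int)) (checkpoint_tiles : List (Int × Int)) (out : List (Int × Int)) : Decidable (Spec_touching_checkpoint_tiles_py filled_tiles checkpoint_tiles out) := by unfold Spec_touching_checkpoint_tiles_py; infer_instance

-- ===== CLAIM (what is proved, stated in full; the proofs are below) =====
def Claim_equal_touching_checkpoint_tiles_py : Prop := ∀ (filled_tiles : List (Int × Int)) (checkpoint_tiles : List (Int × Int)), Dom_touching_checkpoint_tiles_py filled_tiles checkpoint_tiles → Spec_touching_checkpoint_tiles_py filled_tiles checkpoint_tiles (touching_checkpoint_tiles_py filled_tiles checkpoint_tiles)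

-- ===== LEMMAS AND PROOFS =====

-- membership in the dilation accumulator: t is reachable iff it was in the seed or neighbours some filled tile
lemma mem_reach (f : List (Int × Int)) (s : PySem.Set (Int × Int)) (t : Int × Int) :
    t ∈ f.foldl (fun s p => PySem.Set.update s (pvNeighbors p)) s ↔
      t ∈ s ∨ ∃ p ∈ f, t ∈ pvNeighbors p := by
  induction f generalizing s with
  | nil => simp
  | cons p f ih =>
    rw [List.foldl_cons, ih]
    simp only [PySem.Set.mem_update, List.mem_cons]
    constructor
    · rintro ((h|h) | ⟨q, hq, h⟩)
      · exact Or.inl h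
      · exact Or.inr ⟨p, Or.inl rfl, h⟩
      · exact Or.inr ⟨q, Or.inr hq, h⟩
    · rintro (h | ⟨q, (rfl|hq), h⟩)
      · exact Or.inl (Or.inl h)
      · exact Or.inl (Or.inr h)
      · exact Or.inr ⟨q, hq, h⟩

-- the neighbour relation is symmetric: t neighbours p iff p neighbours t
lemma neighbors_symm (t p : Int × Int) : t ∈ pvNeighbors p ↔ p ∈ pvNeighbors t := by
  obtain ⟨a, b⟩ := t; obtain ⟨c, d⟩ := p
  simp only [pvNeighbors, List.mem_cons, List.not_mem_nil, or_false, Prod.mk.injEq]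
  constructor <;> rintro (⟨h1,h2⟩|⟨h1,h2⟩|⟨h1,h2⟩|⟨h1,h2⟩) <;> omega

-- ===== VERDICT (by name: the statement is the Claim_ definition above) =====
theorem touching_checkpoint_tiles_py_spec : Claim_equal_touching_checkpoint_tiles_py := by
  intro f c _
  unfold Spec_touching_checkpoint_tiles_py touching_checkpoint_tiles_py touching_checkpoint_tiles_py_alt
  split
  · rfl
  · congr 1
    funext acc t
    have hmem : (t ∈ f.foldl (fun s p => PySem.Set.update s (pvNeighbors p)) PySem.Set.empty) ↔
        ((t.1 + 1, t.2) ∈ f ∨ (t.1 - 1, t.2) ∈ f ∨ (t.1, t.2 + 1) ∈ f ∨ (t.1, t.2 - 1) ∈ f) := by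
      rw [mem_reach]
      simp only [PySem.Set.empty, List.not_mem_nil, false_or]
      constructor
      · rintro ⟨p, hp, h⟩
        rw [neighbors_symm] at h
        simp only [pvNeighbors, List.mem_cons, List.not_mem_nil, or_false] at h
        rcases h with rfl|rfl|rfl|rfl
        · exact Or.inl hp
        · exact Or.inr (Or.inl hp)
        · exact Or.inr (Or.inr (Or.inl hp))
        · exact Or.inr (Or.inr (Or.inr hp))
      · rintro (h|h|h|h)
        · exact ⟨_, h, by simp [pvNeighbors]⟩
        · exact ⟨_, h, by simp [pvNeighbors]⟩
        · exact ⟨_, h, by simp [pvNeighbors]⟩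
        · exact ⟨_, h, by simp [pvNeighbors]⟩
    rw [show (PySem.Set.empty : List (Int × Int)) = [] from rfl] at hmem
    by_cases hr : t ∈ f.foldl (fun s t => PySem.Set.update s (pvNeighbors t)) []
    · have := hmem.mp hr
      rcases this with h|h|h|h
      · simp [h, hr]
      · by_cases h1 : (t.1 + 1, t.2) ∈ f <;> simp [h1, h, hr]
      · by_cases h1 : (t.1 + 1, t.2) ∈ f <;> by_cases h2 : (t.1 - 1, t.2) ∈ f <;>
          simp [h1, h2, h, hr]
      · by_cases h1 : (t.1 + 1, t.2) ∈ f <;> by_cases h2 : (t.1 - 1, t.2) ∈ f <;>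
          by_cases h3 : (t.1, t.2 + 1) ∈ f <;> simp [h1, h2, h3, h, hr]
    · have := hmem.not.mp hr
      push Not at this
      obtain ⟨h1, h2, h3, h4⟩ := by tauto
      simp [h1, h2, h3, h4, hr]
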